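-- pv_equiv track=rewrite | github.com/rashidc18/toy-cpu | assembler.py | get_line_instructions
-- ===== SOURCE A (Python) =====
-- def get_line_instructions(line):
-- 	column = 0
-- 	instructions = []  # ((start, end), instruction)
--
-- 	reading_instruction = False
-- 	instruction = ''
-- 	instruction_start = None
--
-- 	for char in line:
-- 		if char == ';':
-- 			break
--
-- 		elif char in ' \t\r':
-- 			if reading_instruction:
-- 				instructions.append(((instruction_start, column - 1), instruction))
-- 				reading_instruction = False
-- 				instruction = ''
-- 		else:
-- 			if not reading_instruction:
-- 				instruction_start = column
--
-- 			reading_instruction = True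
-- 			instruction += char
--
-- 		column += 1
--
-- 	if reading_instruction:
-- 		instructions.append(((instruction_start, column - 1), instruction))
--
-- 	return instructions
-- ===== SOURCE B (Python) =====
-- def _run_len(s):
-- 	k = 0
-- 	while k < len(s) and s[k] not in ' \t\r':
-- 		k += 1
-- 	return k
--
--
-- def get_line_instructions(line):
-- 	cut = line.split(';', 1)[0]
-- 	out = []
-- 	i = 0
-- 	rest = cut
-- 	while rest:
-- 		if rest[0] in ' \t\r':
-- 			rest, i = rest[1:], i + 1
-- 		else:
-- 			k = _run_len(rest)
-- 			out.append(((i, i + k - 1), rest[:k]))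
-- 			rest, i = rest[k:], i + k
-- 	return out
-- ===== Notes on version B (the rewrite author's own statement) =====
-- stated objective: alternative
-- what changed: Replaced the per-character boolean state machine with character accumulation by: strip the comment once with split(';',1)[0], then a two-pointer scan that measures each whitespace-free run's length and emits the token by slicing, so no reading_instruction flag and no incremental string building remain.
import Mathlib
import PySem

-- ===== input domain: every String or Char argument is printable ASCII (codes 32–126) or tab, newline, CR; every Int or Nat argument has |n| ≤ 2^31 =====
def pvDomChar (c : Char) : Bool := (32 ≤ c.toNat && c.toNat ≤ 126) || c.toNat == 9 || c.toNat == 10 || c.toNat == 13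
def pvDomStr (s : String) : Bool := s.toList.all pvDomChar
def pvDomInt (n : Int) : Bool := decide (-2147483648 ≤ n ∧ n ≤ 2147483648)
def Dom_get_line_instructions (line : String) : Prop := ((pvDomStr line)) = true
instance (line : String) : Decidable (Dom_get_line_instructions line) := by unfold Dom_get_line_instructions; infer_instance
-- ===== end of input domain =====

-- B strips the comment once and emits tokens by measuring runs and slicing (no boolean
-- state machine, no incremental string building); same O(n) cost, alternative structure.

-- ===== PORT A =====
-- literal port of A's for-loop state machine; Python's `instruction_start = None` is only
-- ever read after being assigned a column, so it is carried as an Int with dummy initial 0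
def pvGoA (cs : List Char) (column : Int) (instructions : List ((Int × Int) × String))
    (reading : Bool) (instruction : String) (instructionStart : Int) :
    List ((Int × Int) × String) :=
  match cs with
  | [] =>
    if reading then instructions ++ [((instructionStart, column - 1), instruction)]
    else instructions
  | c :: rest =>
    if c = ';' then
      -- `break`, then the trailing flush
      if reading then instructions ++ [((instructionStart, column - 1), instruction)]
      else instructions
    else if c = ' ' ∨ c = '\t' ∨ c = '\r' then
      if reading then
        pvGoA rest (column + 1) (instructions ++ [((instructionStart, column - 1), instruction)])
          false "" instructionStart
      else
        pvGoA rest (column + 1) instructions false instruction instructionStart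
    else
      pvGoA rest (column + 1) instructions true (instruction.push c)
        (if reading then instructionStart else column)

def get_line_instructions (line : String) : List ((Int × Int) × String) :=
  pvGoA line.toList 0 [] false "" 0

-- ===== PORT B =====
-- port of Source B: _run_len counts the whitespace-free prefix of the remaining suffix
def pvRunLen (s : List Char) : Nat :=
  match s with
  | [] => 0
  | c :: r => if c = ' ' ∨ c = '\t' ∨ c = '\r' then 0 else pvRunLen r + 1

-- the `while rest:` loop of Source B, over the remaining suffix `rest` with absolute index i
def pvGoB (rest : List Char) (i : Int) : List ((Int × Int) × String) :=
  match rest with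
  | [] => []
  | c :: r =>
    if c = ' ' ∨ c = '\t' ∨ c = '\r' then pvGoB r (i + 1)
    else
      let k := pvRunLen (c :: r)
      ((i, i + (k : Int) - 1), String.ofList ((c :: r).take k)) :: pvGoB ((c :: r).drop k) (i + (k : Int))
termination_by rest.length
decreasing_by
  · simp
  · simp only [pvRunLen, if_neg ‹¬_›, List.length_drop, List.length_cons]
    omega

-- `line.split(';', 1)[0]` = the prefix of line before the first ';'
def get_line_instructions_alt (line : String) : List ((Int × Int) × String) :=
  pvGoB (line.toList.takeWhile (· ≠ ';')) 0

-- ===== PRECONDITION & SPEC =====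
def Spec_get_line_instructions (line : String) (out : List ((Int × Int) × String)) : Prop := out = get_line_instructions_alt line
instance (line : String) (out : List ((Int × Int) × String)) : Decidable (Spec_get_line_instructions line out) := by unfold Spec_get_line_instructions; infer_instance

-- ===== CLAIM (what is proved, stated in full; the proofs are below) =====
def Claim_equal_get_line_instructions : Prop := ∀ (line : String), Dom_get_line_instructions line → Spec_get_line_instructions line (get_line_instructions line)

-- ===== LEMMAS AND PROOFS =====

def pvNonsep (c : Char) : Bool := decide (¬ (c = ' ' ∨ c = '\t' ∨ c = '\r'))

theorem pvRunLen_eq (s : List Char) : pvRunLen s = (s.takeWhile pvNonsep).length := by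
  induction s with
  | nil => rfl
  | cons c r ih =>
    by_cases hs : c = ' ' ∨ c = '\t' ∨ c = '\r' <;>
      simp [pvRunLen, pvNonsep, hs, ih]

theorem pvRunLen_take (s : List Char) : s.take (pvRunLen s) = s.takeWhile pvNonsep := by
  induction s with
  | nil => rfl
  | cons c r ih =>
    by_cases hs : c = ' ' ∨ c = '\t' ∨ c = '\r' <;>
      simp [pvRunLen, pvNonsep, hs, ih]

theorem pvRunLen_drop (s : List Char) : s.drop (pvRunLen s) = s.dropWhile pvNonsep := by
  induction s with
  | nil => rfl
  | cons c r ih =>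
    by_cases hs : c = ' ' ∨ c = '\t' ∨ c = '\r' <;>
      simp [pvRunLen, pvNonsep, hs, ih]

theorem pvPush_ofList (s : String) (c : Char) (l : List Char) :
    s.push c ++ String.ofList l = s ++ String.ofList (c :: l) := by
  apply String.ext
  simp

-- the `break` on ';' behaves like running A on the prefix before the first ';'
theorem pvGoA_break (cs : List Char) (col : Int) (acc : List ((Int × Int) × String))
    (r : Bool) (instr : String) (st : Int) :
    pvGoA cs col acc r instr st = pvGoA (cs.takeWhile (· ≠ ';')) col acc r instr st := by
  induction cs generalizing col acc r instr st with
  | nil => rfl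
  | cons c rest ih =>
    by_cases hc : c = ';'
    · simp [pvGoA, hc]
    · by_cases hs : c = ' ' ∨ c = '\t' ∨ c = '\r' <;>
        cases r <;> simp [pvGoA, hc, hs, ih]

-- in reading state, A consumes the whole whitespace-free run, flushes the token, and
-- resumes in non-reading state at the run's end
theorem pvGoA_run (cs : List Char) (hsemi : ';' ∉ cs) (col : Int)
    (acc : List ((Int × Int) × String)) (instr : String) (st : Int) :
    pvGoA cs col acc true instr st =
      pvGoA (cs.dropWhile pvNonsep) (col + ((cs.takeWhile pvNonsep).length : Int))
        (acc ++ [((st, col + ((cs.takeWhile pvNonsep).length : Int) - 1),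
          instr ++ String.ofList (cs.takeWhile pvNonsep))]) false "" st := by
  induction cs generalizing col instr with
  | nil => simp [pvGoA]
  | cons c rest ih =>
    have hc : c ≠ ';' := fun h => hsemi (h ▸ List.mem_cons_self ..)
    have hrest : ';' ∉ rest := fun h => hsemi (List.mem_cons_of_mem _ h)
    by_cases hs : c = ' ' ∨ c = '\t' ∨ c = '\r'
    · simp [pvGoA, hc, hs, List.takeWhile_cons, List.dropWhile_cons, pvNonsep]
    · rw [show pvGoA (c :: rest) col acc true instr st
          = pvGoA rest (col + 1) acc true (instr.push c) st by simp [pvGoA, hc, hs],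
        ih hrest]
      simp only [List.takeWhile_cons, List.dropWhile_cons, pvNonsep, hs]
      simp only [not_false_eq_true, decide_true, Bool.not_false, if_true, List.length_cons]
      rw [pvPush_ofList]
      push_cast
      ring_nf

-- in non-reading state (instruction = ''), A computes B's token list
theorem pvMain (n : Nat) (cs : List Char) (hn : cs.length ≤ n) (hsemi : ';' ∉ cs)
    (col : Int) (acc : List ((Int × Int) × String)) (st : Int) :
    pvGoA cs col acc false "" st = acc ++ pvGoB cs col := by
  induction n generalizing cs col acc st with
  | zero =>
    have : cs = [] := List.eq_nil_of_length_eq_zero (Nat.le_zero.mp hn)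
    simp [this, pvGoA, pvGoB]
  | succ n ih =>
    cases cs with
    | nil => simp [pvGoA, pvGoB]
    | cons c rest =>
      have hc : c ≠ ';' := fun h => hsemi (h ▸ List.mem_cons_self ..)
      have hrest : ';' ∉ rest := fun h => hsemi (List.mem_cons_of_mem _ h)
      simp only [List.length_cons, Nat.succ_le_succ_iff] at hn
      by_cases hs : c = ' ' ∨ c = '\t' ∨ c = '\r'
      · rw [show pvGoA (c :: rest) col acc false "" st
            = pvGoA rest (col + 1) acc false "" st by simp [pvGoA, hc, hs],
          ih rest hn hrest]
        simp [pvGoB, hs]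
      · rw [show pvGoA (c :: rest) col acc false "" st
            = pvGoA rest (col + 1) acc true ("".push c) col by simp [pvGoA, hc, hs],
          pvGoA_run rest hrest, ih _ (le_trans (List.length_dropWhile_le _ _) hn) ?_]
        · rw [show pvGoB (c :: rest) col
              = ((col, col + ((pvRunLen (c :: rest) : Nat) : Int) - 1),
                  String.ofList ((c :: rest).take (pvRunLen (c :: rest))))
                :: pvGoB ((c :: rest).drop (pvRunLen (c :: rest)))
                    (col + ((pvRunLen (c :: rest) : Nat) : Int)) by simp [pvGoB, hs],
            pvRunLen_take, pvRunLen_drop, pvRunLen_eq]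
          simp only [List.takeWhile_cons, List.dropWhile_cons, pvNonsep, hs]
          simp only [not_false_eq_true, decide_true, Bool.not_false, if_true, List.length_cons]
          rw [pvPush_ofList, List.append_assoc]
          push_cast
          ring_nf
          simp
        · intro h
          exact hrest (List.dropWhile_sublist _ |>.mem h)

-- ===== VERDICT (by name: the statement is the Claim_ definition above) =====
theorem get_line_instructions_spec : Claim_equal_get_line_instructions := by
  intro line _
  unfold Spec_get_line_instructions get_line_instructions get_line_instructions_alt
  rw [pvGoA_break]
  exact pvMain line.toList.length _ (List.takeWhile_sublist _ |>.length_le) 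
    (fun h => by simpa using List.mem_takeWhile_imp h) 0 [] 0
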